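-- pv_equiv track=rewrite | github.com/khyup0629/Algorithm | 해싱(Hashing)/위장(★★).py | solution
-- ===== SOURCE A (Python) =====
-- from itertools import combinations
--
-- def solution(clothes):
--     answer = 0
--
--     cnt = {}
--     for a, b in clothes:
--         cnt[b] = cnt.get(b, 0) + 1
--
--     for i in cnt:
--         answer += cnt[i]
--
--     for i in range(2, len(cnt) + 1):
--         combi = list(combinations(cnt, i))
--         for j in combi:
--             multi = 1
--             for k in j:
--                 multi *= cnt[k]
--             answer += multi
--
--     return answer
-- ===== SOURCE B (Python) =====
-- def solution(clothes):
--     cnt = {}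
--     for _, b in clothes:
--         cnt[b] = cnt.get(b, 0) + 1
--     prod = 1
--     for v in cnt.values():
--         prod *= v + 1
--     return prod - 1
-- ===== Notes on version B (the rewrite author's own statement) =====
-- stated objective: faster
-- what changed: Replaced the enumeration of all size-i combinations of categories (summing products over every nonempty subset) with the closed-form product formula prod(count_i + 1) - 1 computed in one linear pass over the counter.
import Mathlib
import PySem

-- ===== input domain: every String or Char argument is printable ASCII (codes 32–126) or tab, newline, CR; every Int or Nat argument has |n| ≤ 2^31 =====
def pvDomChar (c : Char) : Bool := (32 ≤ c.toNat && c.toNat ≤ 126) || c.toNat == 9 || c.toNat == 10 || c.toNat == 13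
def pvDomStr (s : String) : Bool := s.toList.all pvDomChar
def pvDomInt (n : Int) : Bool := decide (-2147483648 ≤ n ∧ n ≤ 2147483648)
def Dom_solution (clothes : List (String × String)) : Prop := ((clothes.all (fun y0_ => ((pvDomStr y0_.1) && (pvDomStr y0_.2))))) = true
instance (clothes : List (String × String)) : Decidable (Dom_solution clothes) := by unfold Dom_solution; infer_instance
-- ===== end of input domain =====

-- B replaces A's enumeration of all size-i category combinations by the closed-form
-- product ∏(count+1) − 1 over the counter (objective: faster; measured by the check).


-- ===== PORT A =====
def solution (clothes : List (String × String)) : Int :=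
  let answer : Int := 0
  let cnt : PySem.Dict String Int :=
    clothes.foldl (fun d ab => d.insert ab.2 (d.getD ab.2 0 + 1)) PySem.Dict.empty
  let answer := cnt.keys.foldl (fun a i => a + cnt.getD i 0) answer
  let answer := (PySem.List.pyRange 2 ((cnt.keys.length : Int) + 1) 1).foldl
    (fun a i =>
      let combi := PySem.List.combinations cnt.keys i.toNat
      combi.foldl (fun a j => a + j.foldl (fun m k => m * cnt.getD k 0) 1) a)
    answer
  answer

-- ===== PORT B =====
def solution_alt (clothes : List (String × String)) : Int :=
  let cnt : PySem.Dict String Int :=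
    clothes.foldl (fun d ab => d.insert ab.2 (d.getD ab.2 0 + 1)) PySem.Dict.empty
  cnt.values.foldl (fun p v => p * (v + 1)) 1 - 1

-- ===== PRECONDITION & SPEC =====
def Spec_solution (clothes : List (String × String)) (out : Int) : Prop := out = solution_alt clothes
instance (clothes : List (String × String)) (out : Int) : Decidable (Spec_solution clothes out) := by unfold Spec_solution; infer_instance

-- ===== CLAIM (what is proved, stated in full; the proofs are below) =====
def Claim_equal_solution : Prop := ∀ (clothes : List (String × String)), Dom_solution clothes → Spec_solution clothes (solution clothes)

-- ===== LEMMAS AND PROOFS =====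

-- sum of products over all size-r combinations of xs under weight g
def combSum {α : Type} (g : α → Int) (xs : List α) (r : Nat) : Int :=
  ((PySem.List.combinations xs r).map (fun c => (c.map g).prod)).sum

theorem combSum_zero {α : Type} (g : α → Int) (xs : List α) : combSum g xs 0 = 1 := by
  simp [combSum, PySem.List.combinations_zero]

theorem combSum_of_lt {α : Type} (g : α → Int) (xs : List α) (r : Nat)
    (h : xs.length < r) : combSum g xs r = 0 := by
  simp [combSum, PySem.List.combinations_eq_nil_of_length_lt xs h]

theorem combSum_cons_succ {α : Type} (g : α → Int) (x : α) (xs : List α) (r : Nat) :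
    combSum g (x :: xs) (r + 1) = g x * combSum g xs r + combSum g xs (r + 1) := by
  simp [combSum, PySem.List.combinations_cons_succ, List.map_map, Function.comp_def,
    List.sum_map_mul_left]

theorem combSum_one {α : Type} (g : α → Int) (xs : List α) :
    combSum g xs 1 = (xs.map g).sum := by
  simp [combSum, PySem.List.combinations_one, List.map_map, Function.comp_def]

-- the key identity: ∑_{r=0}^{|xs|} combSum g xs r = ∏_{x∈xs} (g x + 1)
theorem sum_combSum {α : Type} (g : α → Int) (xs : List α) :
    ((List.range (xs.length + 1)).map (combSum g xs)).sum
      = (xs.map (fun x => g x + 1)).prod := by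
  induction xs with
  | nil => simp [combSum_zero]
  | cons x xs ih =>
    have h1 : ((List.range (xs.length + 1)).map (fun r => combSum g xs (r + 1))).sum
        = (xs.map (fun x => g x + 1)).prod - 1 := by
      have h2 : ((List.range (xs.length + 1 + 1)).map (combSum g xs)).sum
          = combSum g xs 0 + ((List.range (xs.length + 1)).map (fun r => combSum g xs (r + 1))).sum := by
        rw [List.range_succ_eq_map]
        simp [List.map_map, Function.comp_def, Nat.succ_eq_add_one]
      have h3 : ((List.range (xs.length + 1 + 1)).map (combSum g xs)).sum
          = ((List.range (xs.length + 1)).map (combSum g xs)).sum + combSum g xs (xs.length + 1) := by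
        rw [List.range_succ (n := xs.length + 1)]
        simp
      rw [combSum_zero] at h2
      rw [combSum_of_lt g xs (xs.length + 1) (by omega), ih] at h3
      omega
    have hlen : (x :: xs).length = xs.length + 1 := rfl
    rw [hlen, List.range_succ_eq_map]
    simp only [List.map_cons, List.map_map, Function.comp_def, List.sum_cons, combSum_zero,
      Nat.succ_eq_add_one, combSum_cons_succ]
    rw [PySem.List.sum_map_add_int]
    rw [show ((List.range (xs.length + 1)).map (fun r => g x * combSum g xs r)).sum
          = g x * ((List.range (xs.length + 1)).map (combSum g xs)).sum from by
        simp [List.sum_map_mul_left]]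
    rw [ih, h1]
    simp [List.prod_cons]
    ring

-- pyRange 2 (n+1) sums the combSums for r = 2..n
theorem sum_pyRange_combSum {α : Type} (g : α → Int) (xs : List α) (n : Nat) (hn : 1 ≤ n) :
    ((PySem.List.pyRange 2 ((n : Int) + 1) 1).map (fun i => combSum g xs i.toNat)).sum
      = ((List.range (n + 1)).map (combSum g xs)).sum - 1 - combSum g xs 1 := by
  induction n with
  | zero => omega
  | succ m ih =>
    by_cases hm : 1 ≤ m
    · have hstep : PySem.List.pyRange 2 (((m + 1 : Nat) : Int) + 1) 1
          = PySem.List.pyRange 2 ((m : Int) + 1) 1 ++ [(m : Int) + 1] := by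
        have h := PySem.List.pyRange_one_succ_right (a := 2) (b := (m : Int) + 1) (by omega)
        push_cast
        exact h
      rw [hstep, List.map_append, List.sum_append, ih hm]
      rw [List.range_succ (n := m + 1), List.map_append, List.sum_append]
      have hcast : ((m : Int) + 1).toNat = m + 1 := by omega
      simp only [List.map_cons, List.map_nil, List.sum_cons, List.sum_nil, hcast]
      ring
    · have hm0 : m = 0 := by omega
      subst hm0
      have hempty : PySem.List.pyRange 2 (((1 : Nat) : Int) + 1) 1 = [] := by decide
      rw [hempty]
      rw [show List.range (1 + 1) = [0, 1] from by decide]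
      simp [combSum_zero]

theorem foldl_mul_getD_eq_prod {α : Type} (g : α → Int) (j : List α) :
    j.foldl (fun m k => m * g k) 1 = (j.map g).prod := by
  rw [List.prod_eq_foldl, List.foldl_map]

-- the whole body of A equals the whole body of B, for any counter dict with distinct keys
theorem dict_identity (cnt : PySem.Dict String Int) (hnodup : cnt.keys.Nodup) :
    (PySem.List.pyRange 2 ((cnt.keys.length : Int) + 1) 1).foldl
      (fun a i =>
        (PySem.List.combinations cnt.keys i.toNat).foldl
          (fun a j => a + j.foldl (fun m k => m * cnt.getD k 0) 1) a)
      (cnt.keys.foldl (fun a i => a + cnt.getD i 0) 0)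
    = cnt.values.foldl (fun p v => p * (v + 1)) 1 - 1 := by
  have hvals := PySem.Dict.values_eq_map_keys cnt hnodup 0
  have hbody : (fun (a i : Int) =>
      (PySem.List.combinations cnt.keys i.toNat).foldl
        (fun a j => a + j.foldl (fun m k => m * cnt.getD k 0) 1) a)
      = fun a i => a + combSum (fun k => cnt.getD k 0) cnt.keys i.toNat := by
    funext a i
    rw [PySem.List.foldl_add]
    simp only [combSum]
    congr 1
    congr 1
    exact List.map_congr_left (fun j _ => foldl_mul_getD_eq_prod (fun k => cnt.getD k 0) j)
  have hB : cnt.values.foldl (fun p v => p * (v + 1)) 1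
      = (cnt.keys.map (fun k => cnt.getD k 0 + 1)).prod := by
    rw [hvals]
    simp [List.prod_eq_foldl, List.foldl_map]
  rw [hbody, PySem.List.foldl_add, PySem.List.foldl_add, hB,
    ← combSum_one (fun k => cnt.getD k 0) cnt.keys]
  by_cases h1 : 1 ≤ cnt.keys.length
  · rw [sum_pyRange_combSum (fun k => cnt.getD k 0) cnt.keys cnt.keys.length h1,
      sum_combSum (fun k => cnt.getD k 0) cnt.keys]
    ring
  · have hks0 : cnt.keys = [] := List.length_eq_zero_iff.mp (by omega)
    rw [hks0]
    have hempty : PySem.List.pyRange 2 ((([] : List String).length : Int) + 1) 1 = [] := by decide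
    rw [hempty]
    simp [combSum_one]

-- ===== VERDICT (by name: the statement is the Claim_ definition above) =====
theorem solution_spec : Claim_equal_solution := by
  intro clothes _
  simp only [Spec_solution, solution, solution_alt]
  have hcnt : clothes.foldl (fun d ab => d.insert ab.2 (d.getD ab.2 0 + 1)) PySem.Dict.empty
      = PySem.Dict.counter (clothes.map (fun x => x.2)) := by
    rw [← PySem.Dict.foldl_insert_getD_add_one_eq_counter, List.foldl_map]
  rw [hcnt]
  exact dict_identity _ (PySem.Dict.nodup_keys_counter _)
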